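-- pv_equiv track=rewrite | github.com/nsslabcuus/vNIDS | nfv/orchestration/hsa-python/utils/bytearray_utils.py | byte_to_int
-- ===== SOURCE A (Python) =====
-- def byte_to_int(b):
--     val = 0
--     for i in range(4):
--         b_shift = b >> (i * 2)
--         next_bit = b_shift & 0x03
--         if (next_bit == 0x02):
--             val = val + 2**i
--         elif (next_bit != 0x01):
--             return None
--     return val
-- ===== SOURCE B (Python) =====
-- def _encode(v):
--     byte = 0
--     for i in range(4):
--         byte |= (2 if (v >> i) & 1 else 1) << (2 * i)
--     return byte
--
-- _TABLE = {_encode(v): v for v in range(16)}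
--
-- def byte_to_int(b):
--     return _TABLE.get(b & 0xFF)
-- ===== Notes on version B (the rewrite author's own statement) =====
-- stated objective: alternative
-- what changed: B replaces A's per-call decode loop (shift, mask and test each two-bit pair) with a precomputed inverse table: it builds the dict {encode(v): v} over all sixteen valid values from the opposite-direction encoder once, and answers each call by a single dict lookup on the low byte of the input.
import Mathlib
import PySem

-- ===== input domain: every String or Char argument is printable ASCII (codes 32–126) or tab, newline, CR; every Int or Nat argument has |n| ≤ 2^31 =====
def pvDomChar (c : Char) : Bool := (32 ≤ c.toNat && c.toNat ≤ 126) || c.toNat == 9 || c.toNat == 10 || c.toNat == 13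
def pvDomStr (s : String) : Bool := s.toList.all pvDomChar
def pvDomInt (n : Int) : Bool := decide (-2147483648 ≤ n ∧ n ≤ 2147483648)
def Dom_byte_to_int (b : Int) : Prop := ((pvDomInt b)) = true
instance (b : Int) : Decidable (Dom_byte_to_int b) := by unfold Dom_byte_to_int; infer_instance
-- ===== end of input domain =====

-- B decodes via a precomputed inverse table {encode(v): v} of the valid bytes instead of A's pair-decoding loop (alternative construction, same cost).

-- ===== PORT A =====
-- the for-loop over i in range(4), with the early 'return None'; one structural step
-- per remaining iteration count (fuel = 4 - i), so the recursion is kernel-reducible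
def byteToIntGo (b : Int) : Nat → Nat → Int → Option Int
  | 0, _, val => some val
  | fuel + 1, i, val =>
    if PySem.Int.band (b >>> (i * 2)) 3 = 2 then byteToIntGo b fuel (i + 1) (val + 2 ^ i)
    else if PySem.Int.band (b >>> (i * 2)) 3 ≠ 1 then none
    else byteToIntGo b fuel (i + 1) val

def byte_to_int (b : Int) : Option Int := byteToIntGo b 4 0 0

-- ===== PORT B =====
-- _encode(v): byte |= (2 if (v >> i) & 1 else 1) << (2*i), for i in range(4)
def pvEncode (v : Int) : Int :=
  (List.range 4).foldl
    (fun byte i =>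
      PySem.Int.bor byte ((if PySem.Int.band (v >>> i) 1 ≠ 0 then 2 else 1) <<< (2 * i))) 0

-- _TABLE = {_encode(v): v for v in range(16)}
def pvTable : PySem.Dict Int Int :=
  (List.range 16).foldl (fun d v => d.insert (pvEncode (v : Int)) (v : Int)) PySem.Dict.empty

-- return _TABLE.get(b & 0xFF)
def byte_to_int_alt (b : Int) : Option Int := pvTable.get? (PySem.Int.band b 255)

-- ===== PRECONDITION & SPEC =====
def Spec_byte_to_int (b : Int) (out : Option Int) : Prop := out = byte_to_int_alt b
instance (b : Int) (out : Option Int) : Decidable (Spec_byte_to_int b out) := by unfold Spec_byte_to_int; infer_instance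

-- ===== CLAIM (what is proved, stated in full; the proofs are below) =====
def Claim_equal_byte_to_int : Prop := ∀ (b : Int), Dom_byte_to_int b → Spec_byte_to_int b (byte_to_int b)

-- ===== LEMMAS AND PROOFS =====

theorem nat_and255 (m : Nat) : m &&& 255 = m % 256 := by
  have h := Nat.and_two_pow_sub_one_eq_mod m 8
  norm_num at h
  exact h

theorem nat_and3 (m : Nat) : m &&& 3 = m % 4 := by
  have h := Nat.and_two_pow_sub_one_eq_mod m 2
  norm_num at h
  exact h

theorem nat_and255' (m : Nat) : 255 &&& m = m % 256 := by
  rw [Nat.and_comm]; exact nat_and255 m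

theorem nat_and3' (m : Nat) : 3 &&& m = m % 4 := by
  rw [Nat.and_comm]; exact nat_and3 m

theorem band255 (a : Int) : PySem.Int.band a 255 = a % 256 := by
  unfold PySem.Int.band
  by_cases h : 0 ≤ a
  · simp only [if_pos h, if_pos (by norm_num : (0:Int) ≤ 255),
      show Int.toNat 255 = 255 from by decide, nat_and255]
    omega
  · simp only [if_neg h, if_pos (by norm_num : (0:Int) ≤ 255),
      show Int.toNat 255 = 255 from by decide, nat_and255']
    omega

theorem band3 (a : Int) : PySem.Int.band a 3 = a % 4 := by
  unfold PySem.Int.band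
  by_cases h : 0 ≤ a
  · simp only [if_pos h, if_pos (by norm_num : (0:Int) ≤ 3),
      show Int.toNat 3 = 3 from by decide, nat_and3]
    omega
  · simp only [if_neg h, if_pos (by norm_num : (0:Int) ≤ 3),
      show Int.toNat 3 = 3 from by decide, nat_and3']
    omega

theorem shift_mask_mod (b : Int) (i : Nat) (hi : i < 4) :
    PySem.Int.band (b >>> (i * 2)) 3 = PySem.Int.band ((b % 256) >>> (i * 2)) 3 := by
  rw [band3, band3, Int.shiftRight_eq_div_pow, Int.shiftRight_eq_div_pow]
  interval_cases i <;> norm_num <;> omega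

theorem go_step (b c : Int) (fuel i : Nat)
    (h : PySem.Int.band (b >>> (i * 2)) 3 = PySem.Int.band (c >>> (i * 2)) 3)
    (ih : ∀ val, byteToIntGo b fuel (i + 1) val = byteToIntGo c fuel (i + 1) val) :
    ∀ val, byteToIntGo b (fuel + 1) i val = byteToIntGo c (fuel + 1) i val := by
  intro val
  simp only [byteToIntGo, h]
  split_ifs <;> first | rfl | exact ih _

theorem go_mod (b : Int) : ∀ val, byteToIntGo b 4 0 val = byteToIntGo (b % 256) 4 0 val := by
  have k3 := go_step b (b % 256) 0 3 (shift_mask_mod b 3 (by norm_num)) (fun val => rfl)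
  have k2 := go_step b (b % 256) 1 2 (shift_mask_mod b 2 (by norm_num)) k3
  have k1 := go_step b (b % 256) 2 1 (shift_mask_mod b 1 (by norm_num)) k2
  exact go_step b (b % 256) 3 0 (shift_mask_mod b 0 (by norm_num)) k1

theorem A_mod (b : Int) : byte_to_int b = byte_to_int (b % 256) := go_mod b 0

theorem B_mod (b : Int) : byte_to_int_alt b = byte_to_int_alt (b % 256) := by
  unfold byte_to_int_alt
  rw [band255, band255]
  have h : b % 256 % 256 = b % 256 := by omega
  rw [h]

set_option maxRecDepth 100000 in
theorem small_agree :
    ∀ r : Fin 256, byte_to_int ((r.val : Nat) : Int) = byte_to_int_alt ((r.val : Nat) : Int) := by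
  decide

-- ===== VERDICT (by name: the statement is the Claim_ definition above) =====
theorem byte_to_int_spec : Claim_equal_byte_to_int := by
  intro b _
  show byte_to_int b = byte_to_int_alt b
  rw [A_mod, B_mod]
  have h0 : 0 ≤ b % 256 := Int.emod_nonneg _ (by norm_num)
  have h1 : b % 256 < 256 := Int.emod_lt_of_pos _ (by norm_num)
  have he : b % 256 = (((b % 256).toNat : Nat) : Int) := (Int.toNat_of_nonneg h0).symm
  rw [he]
  exact small_agree ⟨(b % 256).toNat, by omega⟩
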